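-- pv_equiv track=rewrite | github.com/yulan307/Auto_Trading_System | scripts/export_trend_state_research_csv.py | build_state_seq_5d
-- ===== SOURCE A (Python) =====
-- def build_state_seq_5d(day_state_codes: list[str | None]) -> list[str | None]:
--     sequences: list[str | None] = []
--     for index in range(len(day_state_codes)):
--         if index < 5:
--             sequences.append(None)
--             continue
--
--         previous_codes = day_state_codes[index - 5 : index]
--         if any(code is None for code in previous_codes):
--             sequences.append(None)
--             continue
--
--         sequences.append("".join(code for code in previous_codes if code is not None))
--     return sequences
-- ===== SOURCE B (Python) =====
-- def build_state_seq_5d(day_state_codes: list[str | None]) -> list[str | None]: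
--     sequences: list[str | None] = []
--     window = ()   # up to the 5 most recent codes, oldest first
--     streak = 0    # length of the current run of consecutive non-None codes
--     for code in day_state_codes:
--         sequences.append("".join(window) if len(window) == 5 and streak >= 5 else None)
--         window = (window + (code,))[-5:]
--         streak = 0 if code is None else streak + 1
--     return sequences
-- ===== Notes on version B (the rewrite author's own statement) =====
-- stated objective: faster
-- what changed: Replaces per-index slicing and rescanning the slice for None by a single forward state machine that maintains a rolling window of the last five codes and a running streak counter of consecutive non-None codes, each updated in O(1), emitting the joined window only when the window is full and the streak covers it.
import Mathlib
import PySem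

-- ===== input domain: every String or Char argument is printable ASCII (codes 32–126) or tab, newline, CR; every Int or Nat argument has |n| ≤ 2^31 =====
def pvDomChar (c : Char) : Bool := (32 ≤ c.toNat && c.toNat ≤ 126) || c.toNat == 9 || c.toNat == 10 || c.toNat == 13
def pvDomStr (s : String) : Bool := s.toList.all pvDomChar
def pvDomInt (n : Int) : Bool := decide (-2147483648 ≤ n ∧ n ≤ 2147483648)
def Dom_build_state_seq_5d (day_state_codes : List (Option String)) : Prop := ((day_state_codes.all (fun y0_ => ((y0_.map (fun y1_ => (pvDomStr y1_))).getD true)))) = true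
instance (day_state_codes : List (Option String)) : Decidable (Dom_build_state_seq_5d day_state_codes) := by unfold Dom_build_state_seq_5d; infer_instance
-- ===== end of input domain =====

-- B replaces A's per-index slice-and-rescan by one forward state machine: a rolling window of the
-- last five codes and a streak counter of consecutive non-None codes, each updated in O(1) per step.

-- ===== PORT A =====
def build_state_seq_5d (day_state_codes : List (Option String)) : List (Option String) :=
  (PySem.List.pyRange 0 (day_state_codes.length : Int) 1).foldl
    (fun sequences index =>
      if index < 5 then
        sequences ++ [none]
      else
        let previous_codes := PySem.List.slice day_state_codes (some (index - 5)) (some index)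
        if previous_codes.any (fun code => code.isNone) then
          sequences ++ [none]
        else
          sequences ++ [some (PySem.Str.join "" (previous_codes.filterMap id))])
    []

-- ===== PORT B =====
-- state: (sequences, window, streak); the join maps each window cell through getD "", which is
-- exact because the guard (window full, streak ≥ 5) ensures every cell is `some`.
def build_state_seq_5d_alt (day_state_codes : List (Option String)) : List (Option String) :=
  (day_state_codes.foldl
    (fun (st : List (Option String) × List (Option String) × Nat) code =>
      let sequences := st.1
      let window := st.2.1
      let streak := st.2.2
      (sequences ++
         [if window.length = 5 ∧ 5 ≤ streak then
            some (PySem.Str.join "" (window.map (fun c => c.getD "")))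
          else none],
       PySem.List.slice (window ++ [code]) (some (-5)) none,
       if code.isNone then 0 else streak + 1))
    ([], [], 0)).1

-- ===== PRECONDITION & SPEC =====
def Spec_build_state_seq_5d (day_state_codes : List (Option String)) (out : List (Option String)) : Prop := out = build_state_seq_5d_alt day_state_codes
instance (day_state_codes : List (Option String)) (out : List (Option String)) : Decidable (Spec_build_state_seq_5d day_state_codes out) := by unfold Spec_build_state_seq_5d; infer_instance

-- ===== CLAIM (what is proved, stated in full; the proofs are below) =====
def Claim_equal_build_state_seq_5d : Prop := ∀ (day_state_codes : List (Option String)), Dom_build_state_seq_5d day_state_codes → Spec_build_state_seq_5d day_state_codes (build_state_seq_5d day_state_codes)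

-- ===== LEMMAS AND PROOFS =====

/-- What A appends at index `index`. -/
def pvGA (xs : List (Option String)) (index : Int) : Option String :=
  if index < 5 then none
  else
    let previous_codes := PySem.List.slice xs (some (index - 5)) (some index)
    if previous_codes.any (fun code => code.isNone) then none
    else some (PySem.Str.join "" (previous_codes.filterMap id))

theorem A_eq_map (xs : List (Option String)) :
    build_state_seq_5d xs = (PySem.List.pyRange 0 (xs.length : Int) 1).map (pvGA xs) := by
  unfold build_state_seq_5d
  have hfun : (fun (sequences : List (Option String)) (index : Int) =>
      if index < 5 then sequences ++ [none]
      else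
        let previous_codes := PySem.List.slice xs (some (index - 5)) (some index)
        if previous_codes.any (fun code => code.isNone) then sequences ++ [none]
        else sequences ++ [some (PySem.Str.join "" (previous_codes.filterMap id))])
      = fun acc i => acc ++ [pvGA xs i] := by
    funext acc i
    simp only [pvGA]
    split_ifs <;> rfl
  rw [hfun, PySem.List.foldl_append_singleton_eq_map]
  simp

/-- B's window after consuming prefix `p`: the last (up to) five codes. -/
def pvWin (p : List (Option String)) : List (Option String) := p.drop (p.length - 5)

/-- B's streak after consuming prefix `p`. -/
def pvRun (p : List (Option String)) : Nat :=
  p.foldl (fun s c => if c.isNone then 0 else s + 1) 0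

/-- What B appends after consuming prefix `p`. -/
def pvEmit (p : List (Option String)) : Option String :=
  if (pvWin p).length = 5 ∧ 5 ≤ pvRun p then
    some (PySem.Str.join "" ((pvWin p).map (fun c => c.getD "")))
  else none

/-- The stream of values B appends while consuming `r` after prefix `p`. -/
def pvF : List (Option String) → List (Option String) → List (Option String)
  | [], _ => []
  | x :: xs, p => pvEmit p :: pvF xs (p ++ [x])

theorem pvWin_step (p : List (Option String)) (x : Option String) :
    PySem.List.slice (pvWin p ++ [x]) (some (-5)) none = pvWin (p ++ [x]) := by
  rw [PySem.List.slice_from_neg_ofNat _ 5 (by omega)]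
  unfold pvWin
  by_cases h : p.length ≤ 4
  · have h0 : p.length - 5 = 0 := by omega
    simp [h0]
  · have hl : (p.drop (p.length - 5)).length = 5 := by simp; omega
    have h1 : (p.drop (p.length - 5) ++ [x]).length - 5 = 1 := by simp [hl]
    rw [h1]
    rw [List.drop_append_of_le_length (by omega)]
    rw [List.drop_append_of_le_length (by simp)]
    rw [List.drop_drop]
    congr 1
    simp
    omega

theorem pvRun_step (p : List (Option String)) (x : Option String) :
    (if x.isNone then 0 else pvRun p + 1) = pvRun (p ++ [x]) := by
  simp [pvRun, List.foldl_append]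

theorem pvFold_eq (xs : List (Option String)) :
    ∀ (p acc : List (Option String)),
      (xs.foldl
        (fun (st : List (Option String) × List (Option String) × Nat) code =>
          (st.1 ++
             [if st.2.1.length = 5 ∧ 5 ≤ st.2.2 then
                some (PySem.Str.join "" (st.2.1.map (fun c => c.getD "")))
              else none],
           PySem.List.slice (st.2.1 ++ [code]) (some (-5)) none,
           if code.isNone then 0 else st.2.2 + 1))
        (acc, pvWin p, pvRun p)).1 = acc ++ pvF xs p := by
  induction xs with
  | nil => intro p acc; simp [pvF]
  | cons x xs ih =>
    intro p acc
    simp only [List.foldl_cons, pvF]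
    rw [pvWin_step, pvRun_step]
    have := ih (p ++ [x]) (acc ++ [pvEmit p])
    simpa [pvEmit, List.append_assoc] using this

/-- `pvRun` characterisation: the streak covers `k` iff the last `k` codes exist and are all `some`. -/
theorem pvRun_ge_iff (p : List (Option String)) :
    ∀ k : Nat, (k ≤ pvRun p ↔ k ≤ p.length ∧ (p.drop (p.length - k)).all Option.isSome) := by
  induction p using List.reverseRecOn with
  | nil => intro k; simp [pvRun]
  | append_singleton p x ih =>
    intro k
    cases k with
    | zero => simp
    | succ j =>
      cases x with
      | none =>
        have hr : pvRun (p ++ [none]) = 0 := by rw [← pvRun_step]; simp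
        rw [hr]
        constructor
        · omega
        · rintro ⟨hk, hall⟩
          exfalso
          have hm : (p ++ [none]).length - (j + 1) ≤ p.length := by simp
          rw [List.drop_append_of_le_length hm] at hall
          simp at hall
      | some s =>
        have hr : pvRun (p ++ [some s]) = pvRun p + 1 := by rw [← pvRun_step]; simp
        rw [hr]
        have h2 : (p ++ [some s]).length - (j + 1) = p.length - j := by simp
        rw [h2, List.drop_append_of_le_length (by omega), List.all_append]
        simp only [List.all_cons, List.all_nil, Option.isSome_some, Bool.and_true]
        constructor
        · intro h
          have hj := (ih j).mp (by omega)
          exact ⟨by simp; omega, hj.2⟩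
        · rintro ⟨hk, hall⟩
          have hj := (ih j).mpr ⟨by simp at hk; omega, hall⟩
          omega

theorem filterMap_eq_map_getD (l : List (Option String)) (h : l.all Option.isSome) :
    l.filterMap id = l.map (fun c => c.getD "") := by
  induction l with
  | nil => rfl
  | cons c l ih =>
    simp only [List.all_cons, Bool.and_eq_true] at h
    obtain ⟨s, rfl⟩ := Option.isSome_iff_exists.mp h.1
    have hc : List.filterMap id (some s :: l) = s :: List.filterMap id l := by simp
    rw [hc, ih h.2]
    simp

/-- B's emission after prefix `p` is exactly A's value at index `p.length` of the full list. -/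
theorem pvEmit_eq (p r : List (Option String)) :
    pvEmit p = pvGA (p ++ r) ((p.length : Nat) : Int) := by
  by_cases h5 : p.length < 5
  · have hA : pvGA (p ++ r) ((p.length : Nat) : Int) = none := by
      unfold pvGA; rw [if_pos (by omega)]
    have hB : pvEmit p = none := by
      unfold pvEmit
      rw [if_neg]
      rintro ⟨hw, -⟩
      unfold pvWin at hw
      simp at hw
      omega
    rw [hA, hB]
  · have h5' : 5 ≤ p.length := by omega
    unfold pvGA
    rw [if_neg (by omega)]
    have hs : PySem.List.slice (p ++ r) (some (((p.length : Nat) : Int) - 5)) (some ((p.length : Nat) : Int)) = pvWin p := by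
      rw [PySem.List.slice_toNat (ha := by omega) (hb := by omega)]
      have h1 : (((p.length : Nat) : Int) - 5).toNat = p.length - 5 := by omega
      have h2 : (((p.length : Nat) : Int)).toNat = p.length := by omega
      rw [h1, h2]
      have h3 : p.length - (p.length - 5) = 5 := by omega
      rw [h3, List.drop_append_of_le_length (by omega)]
      have h4 : (p.drop (p.length - 5)).length = 5 := by simp; omega
      rw [List.take_append_of_le_length (by omega)]
      unfold pvWin
      exact List.take_of_length_le (by omega)
    rw [hs]
    have hwl : (pvWin p).length = 5 := by unfold pvWin; simp; omega
    by_cases hall : (pvWin p).all Option.isSome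
    · have hrun : 5 ≤ pvRun p := (pvRun_ge_iff p 5).mpr ⟨h5', hall⟩
      rw [if_neg]
      · unfold pvEmit
        rw [if_pos ⟨hwl, hrun⟩, filterMap_eq_map_getD _ hall]
      · simp only [List.any_eq_true, not_exists]
        intro c hc
        obtain ⟨hmem, hn⟩ := hc
        have h := List.all_eq_true.mp hall c hmem
        cases c
        · simp at h
        · simp at hn
    · have hrun : ¬ 5 ≤ pvRun p := fun h => hall ((pvRun_ge_iff p 5).mp h).2
      rw [if_pos]
      · unfold pvEmit
        rw [if_neg (by tauto)]
      · simp only [List.all_eq_true] at hall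
        push Not at hall
        obtain ⟨c, hc, hcs⟩ := hall
        simp only [List.any_eq_true]
        exact ⟨c, hc, by cases c <;> simp_all⟩

theorem pvF_eq_map (r : List (Option String)) :
    ∀ p : List (Option String),
      pvF r p = (List.range r.length).map
        (fun j => pvGA (p ++ r) (((p.length + j : Nat) : Int))) := by
  induction r with
  | nil => intro p; simp [pvF]
  | cons x xs ih =>
    intro p
    simp only [pvF, List.length_cons, List.range_succ_eq_map, List.map_cons, List.map_map]
    congr 1
    · simpa using pvEmit_eq p (x :: xs)
    · rw [ih (p ++ [x])]
      apply List.map_congr_left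
      intro j _
      have h1 : (p ++ [x]) ++ xs = p ++ x :: xs := by simp
      have h2 : ((p ++ [x]).length + j : Nat) = (p.length + (j + 1) : Nat) := by simp; omega
      simp only [Function.comp_apply, h1, h2]

theorem pv_agree (xs : List (Option String)) :
    build_state_seq_5d xs = build_state_seq_5d_alt xs := by
  rw [A_eq_map]
  have hB : build_state_seq_5d_alt xs = pvF xs [] := pvFold_eq xs [] []
  rw [hB, pvF_eq_map xs []]
  apply List.ext_getElem
  · simp [PySem.List.length_pyRange_one]
  · intro i hi1 hi2
    have hn : i < xs.length := by
      simpa [PySem.List.length_pyRange_one] using hi1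
    rw [List.getElem_map, List.getElem_map, PySem.List.getElem_pyRange_one, List.getElem_range]
    simp

-- ===== VERDICT (by name: the statement is the Claim_ definition above) =====
theorem build_state_seq_5d_spec : Claim_equal_build_state_seq_5d := by
  intro day_state_codes _
  exact pv_agree day_state_codes
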